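-- pv_equiv track=rewrite | github.com/Keerthivaasan-VG/Tarcin-Tech-Challenge | KCE-PLATFORM-T24-P04.py | transform
-- ===== SOURCE A (Python) =====
-- def transform(arr):
--     result = []
--     n = len(arr)
--
--     for i in range(n):
--         if i == 0:  # first element
--             result.append(arr[i+1])
--         elif i == n-1:  # last element
--             result.append(arr[i-1])
--         else:  # middle elements
--             result.append(arr[i-1] * arr[i+1])
--     return result
-- ===== SOURCE B (Python) =====
-- def transform(arr):
--     if not arr:
--         return []
--     # Pad shifted copies with the multiplicative identity: left[i] = arr[i-1] (1 at i=0),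
--     # right[i] = arr[i+1] (1 at i=n-1); the answer is their pointwise product, no branching.
--     left = [1] + arr[:-1]
--     right = arr[1:] + [1]
--     return [l * r for l, r in zip(left, right)]
-- ===== Notes on version B (the rewrite author's own statement) =====
-- stated objective: alternative
-- what changed: Replaces A's branching index loop (three cases per position) by a branch-free staged construction: build two whole shifted arrays padded with the multiplicative identity 1 and return their pointwise product.
import Mathlib
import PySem

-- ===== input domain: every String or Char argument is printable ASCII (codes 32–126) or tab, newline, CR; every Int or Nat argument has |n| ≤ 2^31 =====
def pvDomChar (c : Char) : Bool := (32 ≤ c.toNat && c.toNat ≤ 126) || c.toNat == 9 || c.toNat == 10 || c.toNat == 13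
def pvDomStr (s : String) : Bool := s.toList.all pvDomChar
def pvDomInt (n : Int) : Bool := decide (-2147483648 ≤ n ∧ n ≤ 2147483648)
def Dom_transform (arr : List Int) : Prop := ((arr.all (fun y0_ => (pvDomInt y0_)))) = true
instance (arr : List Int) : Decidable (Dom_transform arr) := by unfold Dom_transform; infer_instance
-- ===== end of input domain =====

-- B replaces A's branching index loop by a branch-free staged construction: two identity-padded
-- shifted copies of the array, multiplied pointwise (objective: alternative).

-- ===== PORT A =====
-- for i in range(n): if i==0 append arr[i+1]; elif i==n-1 append arr[i-1]; else append arr[i-1]*arr[i+1]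
-- (indexing via pyGetD with default 0: inside Pre_transform every index A uses is in range, so the default is never read)
def transform (arr : List Int) : List Int :=
  (PySem.List.pyRange 0 (arr.length : Int) 1).foldl
    (fun result i =>
      if i = 0 then result ++ [PySem.List.pyGetD arr (i + 1) 0]
      else if i = (arr.length : Int) - 1 then result ++ [PySem.List.pyGetD arr (i - 1) 0]
      else result ++ [PySem.List.pyGetD arr (i - 1) 0 * PySem.List.pyGetD arr (i + 1) 0]) []

-- ===== PORT B =====
-- if not arr: return []; left = [1] + arr[:-1]; right = arr[1:] + [1]; return [l*r for l,r in zip(left,right)]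
def transform_alt (arr : List Int) : List Int :=
  if arr.length = 0 then []
  else
    let left := 1 :: PySem.List.slice arr none (some (-1))
    let right := PySem.List.slice arr (some 1) none ++ [1]
    List.zipWith (· * ·) left right

-- ===== PRECONDITION & SPEC =====
-- Pre_ excludes only singleton lists, on which A raises IndexError (arr[i+1] with i = 0, n = 1).
def Pre_transform (arr : List Int) : Prop := arr.length ≠ 1
instance (arr : List Int) : Decidable (Pre_transform arr) := by unfold Pre_transform; infer_instance
def pvWitness_transform : List Int := [1, 2, 3]

def Spec_transform (arr : List Int) (out : List Int) : Prop := out = transform_alt arr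
instance (arr : List Int) (out : List Int) : Decidable (Spec_transform arr out) := by unfold Spec_transform; infer_instance

-- ===== CLAIM (what is proved, stated in full; the proofs are below) =====
def Claim_equal_transform : Prop := ∀ (arr : List Int), Dom_transform arr → Pre_transform arr → Spec_transform arr (transform arr)

-- ===== LEMMAS AND PROOFS =====

-- ===== VERDICT (by name: the statement is the Claim_ definition above) =====
theorem transform_spec : Claim_equal_transform := by
  intro arr _ hpre
  unfold Spec_transform transform transform_alt
  rcases Nat.eq_zero_or_pos arr.length with h0 | hpos
  · simp [h0, PySem.List.pyRange_one_eq_nil]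
  · have h2 : 2 ≤ arr.length := by unfold Pre_transform at hpre; omega
    have hf : (fun (result : List Int) (i : Int) =>
        if i = 0 then result ++ [PySem.List.pyGetD arr (i + 1) 0]
        else if i = (arr.length : Int) - 1 then result ++ [PySem.List.pyGetD arr (i - 1) 0]
        else result ++ [PySem.List.pyGetD arr (i - 1) 0 * PySem.List.pyGetD arr (i + 1) 0])
      = (fun result i => result ++
          [if i = 0 then PySem.List.pyGetD arr (i + 1) 0
           else if i = (arr.length : Int) - 1 then PySem.List.pyGetD arr (i - 1) 0
           else PySem.List.pyGetD arr (i - 1) 0 * PySem.List.pyGetD arr (i + 1) 0]) := by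
      funext r i; split_ifs <;> rfl
    rw [hf, PySem.List.foldl_append_singleton_eq_map, PySem.List.pyRange_one]
    rw [if_neg (by omega : ¬ arr.length = 0)]
    rw [PySem.List.slice_to_neg_one, PySem.List.slice_from_one]
    apply List.ext_getElem
    · simp; omega
    · intro k hk1 hk2
      have hkn : k < arr.length := by simpa using hk1
      have hzl : (List.zipWith (· * ·) (1 :: arr.dropLast) (arr.tail ++ [1]))[k]'hk2
          = (1 :: arr.dropLast)[k]'(by simp <;> omega) * (arr.tail ++ [1])[k]'(by simp <;> omega) := by
        simp [List.getElem_zipWith]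
      simp only [List.nil_append, List.getElem_map, List.getElem_range, zero_add]
      rw [hzl]
      by_cases hk0 : k = 0
      · subst hk0
        have e1 : ((0:Nat):Int) + 1 = ((1:Nat):Int) := by omega
        rw [if_pos (by omega), e1, PySem.List.pyGetD_natCast,
            List.getD_eq_getElem _ _ (by omega : 1 < arr.length)]
        have h2' : (arr.tail ++ [1])[0]'(by simp <;> omega) = arr[1]'(by omega) := by
          rw [List.getElem_append_left (by simp <;> omega)]
          exact List.getElem_tail _
        rw [h2']
        simp
      · have e2 : ((k:Nat):Int) - 1 = ((k-1:Nat):Int) := by omega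
        have hleft : (1 :: arr.dropLast)[k]'(by simp <;> omega) = arr[k-1]'(by omega) := by
          rcases Nat.exists_eq_succ_of_ne_zero hk0 with ⟨m, rfl⟩
          simp [List.getElem_cons_succ, List.getElem_dropLast]
        by_cases hklast : k = arr.length - 1
        · rw [if_neg (by omega), if_pos (by omega), e2, PySem.List.pyGetD_natCast,
              List.getD_eq_getElem _ _ (by omega : k - 1 < arr.length), hleft]
          have h2' : (arr.tail ++ [1])[k]'(by simp <;> omega) = 1 := by
            rw [List.getElem_append_right (by simp <;> omega)]
            simp
          rw [h2']
          simp
        · have e3 : ((k:Nat):Int) + 1 = ((k+1:Nat):Int) := by omega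
          rw [if_neg (by omega), if_neg (by omega), e2, e3,
              PySem.List.pyGetD_natCast, PySem.List.pyGetD_natCast,
              List.getD_eq_getElem _ _ (by omega : k - 1 < arr.length),
              List.getD_eq_getElem _ _ (by omega : k + 1 < arr.length), hleft]
          have h2' : (arr.tail ++ [1])[k]'(by simp <;> omega) = arr[k+1]'(by omega) := by
            rw [List.getElem_append_left (by simp <;> omega)]
            exact List.getElem_tail _
          rw [h2']
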